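-- pv_equiv track=rewrite | github.com/NathanJ60/CheckX | checkx_model.py | _each_row_col_has_black
-- ===== SOURCE A (Python) =====
-- GRID = 8
--
-- def _each_row_col_has_black(blacks) -> bool:
--     for r in range(GRID):
--         if not any(blacks[r]):
--             return False
--     for c in range(GRID):
--         if not any(blacks[r][c] for r in range(GRID)):
--             return False
--     return True
-- ===== SOURCE B (Python) =====
-- GRID = 8
--
-- def _each_row_col_has_black(blacks) -> bool:
--     row_has = [False] * GRID
--     col_has = [False] * GRID
--     for r, row in enumerate(blacks[:GRID]):
--         row_has[r] = any(row)
--         for c, v in enumerate(row[:GRID]):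
--             if v:
--                 col_has[c] = True
--     return all(row_has) and all(col_has)
-- ===== Notes on version B (the rewrite author's own statement) =====
-- stated objective: simpler
-- what changed: Replaced A's two sequential passes (a row scan with early return, then a per-column re-scan of the grid) by a single nested traversal of the first 8 rows that maintains row_has/col_has tracker arrays, combined at the end with all().
import Mathlib
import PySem

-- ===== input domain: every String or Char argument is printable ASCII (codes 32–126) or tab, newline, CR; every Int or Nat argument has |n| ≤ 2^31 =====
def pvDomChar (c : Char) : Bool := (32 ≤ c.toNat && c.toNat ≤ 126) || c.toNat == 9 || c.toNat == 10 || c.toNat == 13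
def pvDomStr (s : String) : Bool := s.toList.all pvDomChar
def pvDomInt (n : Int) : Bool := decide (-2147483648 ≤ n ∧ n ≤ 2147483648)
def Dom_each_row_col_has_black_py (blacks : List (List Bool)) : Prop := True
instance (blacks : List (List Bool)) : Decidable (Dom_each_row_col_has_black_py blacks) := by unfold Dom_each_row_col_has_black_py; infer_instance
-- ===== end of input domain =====

-- B replaces A's row pass plus column re-scan by a single nested traversal that maintains
-- row/column trackers (objective: simpler decomposition, same cost).

-- ===== PORT A =====
-- blacks[r] (IndexError → none, defaulted; Pre_ excludes inputs where Python raises)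
def pvRowAt (blacks : List (List Bool)) (r : Nat) : List Bool :=
  (PySem.List.pyGet? blacks (r : Int)).getD []
-- blacks[r][c] with the same convention
def pvCellAt (blacks : List (List Bool)) (r c : Nat) : Bool :=
  (PySem.List.pyGet? (pvRowAt blacks r) (c : Int)).getD false

-- 'for r in range(8): if not any(blacks[r]): return False' is the all-quantified test,
-- then the column loop, in A's order.
def each_row_col_has_black_py (blacks : List (List Bool)) : Bool :=
  if (List.range 8).all (fun r => (pvRowAt blacks r).any id) then
    (List.range 8).all (fun c => (List.range 8).any (fun r => pvCellAt blacks r c))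
  else false

-- ===== PORT B =====
-- transliteration of Source B: one pass over enumerate(blacks[:8]) maintaining row_has / col_has.
-- enumerate indices are the nonnegative Python ints; .toNat is exact on them.
def each_row_col_has_black_py_alt (blacks : List (List Bool)) : Bool :=
  let init : List Bool × List Bool := (List.replicate 8 false, List.replicate 8 false)
  let res := (PySem.List.enumerate (PySem.List.slice blacks none (some 8))).foldl
    (fun st p =>
      let rowHas := st.1.set p.1.toNat ((p.2).any id)
      let colHas := (PySem.List.enumerate (PySem.List.slice p.2 none (some 8))).foldl
        (fun ch q => if q.2 then ch.set q.1.toNat true else ch) st.2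
      (rowHas, colHas))
    init
  res.1.all id && res.2.all id

-- ===== PRECONDITION & SPEC =====
-- Pre_ excludes exactly the grids on which the Python A raises IndexError: fewer than 8 rows,
-- or a row shorter than 8 actually reached by the column scan, with no earlier all-false row
-- or earlier fully-defined all-false column making A return False first.  (The Lean ports,
-- which default a missing cell to false where Python raises, agree on all inputs, so the
-- equality proof below does not need Pre_; Pre_ only delimits where Python A returns.)
def Pre_each_row_col_has_black_py (blacks : List (List Bool)) : Prop :=
  (∃ r, r < min 8 blacks.length ∧ ¬ ((blacks.getD r []).any id = true)) ∨
  (8 ≤ blacks.length ∧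
    ∀ c < 8,
      (∃ r < 8, (blacks.getD r []).length ≤ c ∧
        ∀ r' < r, c < (blacks.getD r' []).length ∧ (blacks.getD r' []).getD c false = false) →
      (∃ c' < c, ∀ r < 8, c' < (blacks.getD r []).length ∧ (blacks.getD r []).getD c' false = false))
instance (blacks : List (List Bool)) : Decidable (Pre_each_row_col_has_black_py blacks) := by
  unfold Pre_each_row_col_has_black_py; infer_instance

def pvWitness_each_row_col_has_black_py : List (List Bool) :=
  List.replicate 8 (List.replicate 8 true)

def Spec_each_row_col_has_black_py (blacks : List (List Bool)) (out : Bool) : Prop := out = each_row_col_has_black_py_alt blacks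
instance (blacks : List (List Bool)) (out : Bool) : Decidable (Spec_each_row_col_has_black_py blacks out) := by unfold Spec_each_row_col_has_black_py; infer_instance

-- ===== CLAIM (what is proved, stated in full; the proofs are below) =====
def Claim_equal_each_row_col_has_black_py : Prop := ∀ (blacks : List (List Bool)), Dom_each_row_col_has_black_py blacks → Pre_each_row_col_has_black_py blacks → Spec_each_row_col_has_black_py blacks (each_row_col_has_black_py blacks)

-- ===== LEMMAS AND PROOFS =====

-- the fold of B computes its two components independently
theorem pv_fold_pair {α β γ : Type} (l : List α) (a : β) (b : γ)
    (f : β → α → β) (g : γ → α → γ) :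
    l.foldl (fun st p => (f st.1 p, g st.2 p)) (a, b) = (l.foldl f a, l.foldl g b) := by
  induction l generalizing a b with
  | nil => rfl
  | cons x xs ih => simp [List.foldl, ih]

-- length is preserved by the set-folds
theorem pv_len_rowfold (l : List (Int × List Bool)) (rh : List Bool) :
    (l.foldl (fun rh p => rh.set p.1.toNat ((p.2).any id)) rh).length = rh.length := by
  induction l generalizing rh with
  | nil => rfl
  | cons x xs ih => simp [List.foldl, ih]

theorem pv_len_colfold (l : List (Int × Bool)) (ch : List Bool) :
    (l.foldl (fun ch q => if q.2 then ch.set q.1.toNat true else ch) ch).length = ch.length := by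
  induction l generalizing ch with
  | nil => rfl
  | cons x xs ih =>
    simp only [List.foldl]
    rw [ih]; split <;> simp

-- row tracker: entry j of the fold over enumerate rows s
theorem pv_rowfold_getD (rows : List (List Bool)) (s : Nat) (rh : List Bool) (j : Nat) :
    ((PySem.List.enumerate rows (s : Int)).foldl
        (fun rh p => rh.set p.1.toNat ((p.2).any id)) rh).getD j false
      = if s ≤ j ∧ j - s < rows.length ∧ j < rh.length then (rows.getD (j - s) []).any id
        else rh.getD j false := by
  induction rows generalizing s rh with
  | nil => simp
  | cons row rows ih =>
    rw [PySem.List.enumerate_cons]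
    simp only [List.foldl]
    have hs : ((s : Int) + 1) = ((s + 1 : Nat) : Int) := by push_cast; ring
    rw [hs, ih]
    simp only [List.length_cons]
    rcases Nat.lt_trichotomy j s with h | h | h
    · simp only [List.length_set]
      rw [if_neg (by omega), if_neg (by omega)]
      rw [List.getD_eq_getElem?_getD, List.getD_eq_getElem?_getD,
        List.getElem?_set_ne (by simp; omega)]
    · subst h
      simp only [List.length_set, Int.toNat_natCast]
      rw [if_neg (by omega)]
      by_cases hl : j < rh.length
      · rw [if_pos (by omega)]
        simp [List.getD_eq_getElem?_getD, hl]
      · rw [if_neg (by omega)]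
        rw [List.getD_eq_getElem?_getD, List.getD_eq_getElem?_getD, List.set_eq_of_length_le (by omega)]
    · simp only [List.length_set, Int.toNat_natCast]
      by_cases hcond : s + 1 ≤ j ∧ j - (s + 1) < rows.length ∧ j < rh.length
      · obtain ⟨h1', h2', h3'⟩ := hcond
        rw [if_pos (⟨h1', h2', h3'⟩ : _ ∧ _ ∧ _), if_pos (⟨by omega, by omega, h3'⟩ : _ ∧ _ ∧ _)]
        have : j - s = (j - (s+1)) + 1 := by omega
        simp [this]
      · have hneg : ¬(s ≤ j ∧ j - s < rows.length + 1 ∧ j < rh.length) := by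
          rintro ⟨a1, a2, a3⟩; exact hcond ⟨by omega, by omega, a3⟩
        rw [if_neg hcond, if_neg hneg]
        by_cases hl : j < rh.length
        · rw [List.getD_eq_getElem?_getD, List.getD_eq_getElem?_getD,
            List.getElem?_set_ne (by simp; omega)]
        · rw [List.getD_eq_getElem?_getD, List.getD_eq_getElem?_getD,
            List.getElem?_eq_none (by simp; omega), List.getElem?_eq_none (by omega)]

-- column tracker, inner fold over one row
theorem pv_colfold_inner_getD (row : List Bool) (s : Nat) (ch : List Bool) (j : Nat) :
    ((PySem.List.enumerate row (s : Int)).foldl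
        (fun ch q => if q.2 then ch.set q.1.toNat true else ch) ch).getD j false
      = (ch.getD j false ||
          (decide (s ≤ j) && decide (j - s < row.length) && row.getD (j - s) false && decide (j < ch.length))) := by
  induction row generalizing s ch with
  | nil => simp
  | cons v row ih =>
    rw [PySem.List.enumerate_cons]
    simp only [List.foldl]
    have hs : ((s : Int) + 1) = ((s + 1 : Nat) : Int) := by push_cast; ring
    rw [hs, ih]
    by_cases hv : v = true
    · subst hv
      simp only [if_pos trivial, List.length_set, Int.toNat_natCast]
      rcases Nat.lt_trichotomy j s with h | h | h
      · rw [List.getD_eq_getElem?_getD (l := ch.set s true),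
          List.getElem?_set_ne (by simp; omega), ← List.getD_eq_getElem?_getD]
        have h1 : decide (s ≤ j) = false := by simp; omega
        have h2 : decide (s + 1 ≤ j) = false := by simp; omega
        have h2' : decide (s < j) = false := by simp; omega
        simp [h1, h2']
      · subst h
        by_cases hl : j < ch.length
        · rw [List.getD_eq_getElem?_getD (l := ch.set j true), List.getElem?_set_self (by omega)]
          simp [hl]
        · rw [List.getD_eq_getElem?_getD (l := ch.set j true), List.set_eq_of_length_le (by omega),
            ← List.getD_eq_getElem?_getD]
          have h2 : decide (j < ch.length) = false := by simp; omega
          simp [h2]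
      · rw [List.getD_eq_getElem?_getD (l := ch.set s true)]
        by_cases hl : s < ch.length
        · rw [List.getElem?_set_ne (by simp; omega), ← List.getD_eq_getElem?_getD]
          have h1 : decide (s ≤ j) = true := by simp; omega
          have h2 : decide (s + 1 ≤ j) = true := by simp; omega
          have h2' : decide (s < j) = true := by simp; omega
          have h3 : j - s = (j - (s+1)) + 1 := by omega
          simp [h1, h2', h3]
        · rw [List.set_eq_of_length_le (by omega), ← List.getD_eq_getElem?_getD]
          have h1 : decide (s ≤ j) = true := by simp; omega
          have h2 : decide (s + 1 ≤ j) = true := by simp; omega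
          have h2' : decide (s < j) = true := by simp; omega
          have h3 : j - s = (j - (s+1)) + 1 := by omega
          simp [h1, h2', h3]
    · simp only [Bool.not_eq_true] at hv
      subst hv
      simp only [Bool.false_eq_true, if_false]
      rcases Nat.lt_trichotomy j s with h | h | h
      · have h1 : decide (s ≤ j) = false := by simp; omega
        have h1' : decide (s < j) = false := by simp; omega
        have h2 : decide (s + 1 ≤ j) = false := by simp; omega
        simp [h1, h1']
      · subst h
        simp
      · have h1 : decide (s ≤ j) = true := by simp; omega
        have h1' : decide (s < j) = true := by simp; omega
        have h2 : decide (s + 1 ≤ j) = true := by simp; omega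
        have h3 : j - s = (j - (s+1)) + 1 := by omega
        simp [h1, h1', h3]

-- outer fold over rows for the column tracker (the row index is ignored)
theorem pv_colfold_getD (rows : List (List Bool)) (s : Int) (ch : List Bool) (j : Nat) :
    ((PySem.List.enumerate rows s).foldl
        (fun ch p => (PySem.List.enumerate (PySem.List.slice p.2 none (some 8))).foldl
          (fun ch q => if q.2 then ch.set q.1.toNat true else ch) ch) ch).getD j false
      = (ch.getD j false ||
          (decide (j < ch.length) &&
            rows.any (fun row => decide (j < row.length) && decide (j < 8) && row.getD j false))) := by
  induction rows generalizing s ch with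
  | nil => simp
  | cons row rows ih =>
    rw [PySem.List.enumerate_cons]
    simp only [List.foldl, List.any_cons]
    rw [ih]
    have hsl : PySem.List.slice row none (some 8) = row.take 8 := by
      have := PySem.List.slice_to (xs := row) (b := (8:Int)) (by norm_num)
      simpa using this
    rw [hsl]
    have h0 : ((0 : Nat) : Int) = (0 : Int) := rfl
    rw [← h0, pv_colfold_inner_getD, pv_len_colfold]
    have hgd : (row.take 8).getD (j - 0) false = if j < 8 then row.getD j false else false := by
      simp only [Nat.sub_zero]
      by_cases h8 : j < 8
      · rw [if_pos h8, List.getD_eq_getElem?_getD, List.getD_eq_getElem?_getD,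
          List.getElem?_take]
        simp [h8]
      · rw [if_neg h8, List.getD_eq_getElem?_getD, List.getElem?_take]
        simp [h8]
    by_cases h8 : j < 8
    · have hlen : decide (j - 0 < (row.take 8).length) = decide (j < row.length) := by
        simp [List.length_take]; omega
      have h8' : decide (j < 8) = true := decide_eq_true h8
      have h00 : decide ((0:Nat) ≤ j) = true := decide_eq_true (Nat.zero_le j)
      rw [hgd, if_pos h8, hlen]
      simp only [h00, h8', Bool.true_and, Bool.and_true]
      cases hrv : row.getD j false <;> cases hch : ch.getD j false <;>
        cases hjc : decide (j < ch.length) <;> cases hjr : decide (j < row.length) <;> simp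
    · have h8' : decide (j < 8) = false := by simp [h8]
      rw [hgd, if_neg h8]
      simp [h8']

theorem pv_getD_replicate_false (n i : Nat) :
    (List.replicate n false).getD i false = false := by
  rw [List.getD_eq_getElem?_getD, List.getElem?_replicate]
  split <;> rfl

-- l.all id over getD, for lists of a known length
theorem pv_len_colouter (l : List (Int × List Bool)) (ch : List Bool) :
    (l.foldl (fun ch p => (PySem.List.enumerate (PySem.List.slice p.2 none (some 8))).foldl
      (fun ch q => if q.2 then ch.set q.1.toNat true else ch) ch) ch).length = ch.length := by
  induction l generalizing ch with
  | nil => rfl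
  | cons x xs ih => simp [List.foldl, ih, pv_len_colfold]

theorem pv_all_id_iff (l : List Bool) :
    (l.all id = true) ↔ ∀ j < l.length, l.getD j false = true := by
  constructor
  · intro h j hj
    rw [List.getD_eq_getElem?_getD, List.getElem?_eq_getElem hj]
    exact List.all_eq_true.mp h _ (List.getElem_mem hj)
  · intro h
    refine List.all_eq_true.mpr ?_
    intro b hb
    obtain ⟨j, hj, rfl⟩ := List.mem_iff_getElem.mp hb
    have := h j hj
    rwa [List.getD_eq_getElem?_getD, List.getElem?_eq_getElem hj] at this

-- the A-side accessors in getD form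
theorem pv_rowAt_eq (blacks : List (List Bool)) (r : Nat) :
    pvRowAt blacks r = blacks.getD r [] := by
  simp [pvRowAt, List.getD_eq_getElem?_getD]

theorem pv_cellAt_eq (blacks : List (List Bool)) (r c : Nat) :
    pvCellAt blacks r c = (blacks.getD r []).getD c false := by
  simp [pvCellAt, pv_rowAt_eq, List.getD_eq_getElem?_getD]

-- ===== VERDICT (by name: the statement is the Claim_ definition above) =====
theorem each_row_col_has_black_py_spec : Claim_equal_each_row_col_has_black_py := by
  intro blacks _ _
  unfold Spec_each_row_col_has_black_py
  unfold each_row_col_has_black_py each_row_col_has_black_py_alt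
  dsimp only
  have hp := pv_fold_pair (PySem.List.enumerate (PySem.List.slice blacks none (some 8)))
    (List.replicate 8 false) (List.replicate 8 false)
    (fun rh (p : Int × List Bool) => rh.set p.1.toNat (p.2.any id))
    (fun ch (p : Int × List Bool) =>
      List.foldl (fun ch (q : Int × Bool) => if q.2 = true then ch.set q.1.toNat true else ch) ch
        (PySem.List.enumerate (PySem.List.slice p.2 none (some 8))))
  rw [hp]
  have hsl : PySem.List.slice blacks none (some 8) = blacks.take 8 := by
    have := PySem.List.slice_to (xs := blacks) (b := (8:Int)) (by norm_num)
    simpa using this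
  rw [hsl]
  have h0 : PySem.List.enumerate (blacks.take 8) 0
      = PySem.List.enumerate (blacks.take 8) ((0:Nat) : Int) := rfl
  -- row component of B equals A's first test
  have hrow : ((PySem.List.enumerate (blacks.take 8) 0).foldl
      (fun rh p => rh.set p.1.toNat ((p.2).any id)) (List.replicate 8 false)).all id
      = (List.range 8).all (fun r => (pvRowAt blacks r).any id) := by
    rw [Bool.eq_iff_iff, pv_all_id_iff, List.all_eq_true]
    rw [h0]
    constructor
    · intro h r hr
      rw [List.mem_range] at hr
      have := h r (by rw [pv_len_rowfold]; simpa using hr)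
      rw [pv_rowfold_getD] at this
      rw [pv_rowAt_eq]
      by_cases hlt : r < blacks.length
      · rw [if_pos (by simp [List.length_take]; omega)] at this
        rw [Nat.sub_zero] at this
        rwa [List.getD_eq_getElem?_getD, List.getElem?_take, if_pos hr,
          ← List.getD_eq_getElem?_getD] at this
      · rw [if_neg (by simp [List.length_take]; omega), pv_getD_replicate_false] at this
        simp at this
    · intro h j hj
      rw [pv_len_rowfold, List.length_replicate] at hj
      rw [pv_rowfold_getD]
      have hA := h j (List.mem_range.mpr hj)
      rw [pv_rowAt_eq] at hA
      by_cases hlt : j < blacks.length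
      · rw [if_pos (by simp [List.length_take]; omega)]
        rw [Nat.sub_zero, List.getD_eq_getElem?_getD, List.getElem?_take, if_pos hj,
          ← List.getD_eq_getElem?_getD]
        exact hA
      · exfalso
        rw [List.getD_eq_getElem?_getD, List.getElem?_eq_none (by omega)] at hA
        simp at hA
  -- column component of B equals A's second test
  have hcol : ((PySem.List.enumerate (blacks.take 8) 0).foldl
      (fun ch p => (PySem.List.enumerate (PySem.List.slice p.2 none (some 8))).foldl
        (fun ch q => if q.2 then ch.set q.1.toNat true else ch) ch) (List.replicate 8 false)).all id
      = (List.range 8).all (fun c => (List.range 8).any (fun r => pvCellAt blacks r c)) := by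
    rw [Bool.eq_iff_iff, pv_all_id_iff, List.all_eq_true]
    constructor
    · intro h c hc
      rw [List.mem_range] at hc
      have hc' : decide (c < (8:Nat)) = true := decide_eq_true hc
      have := h c (by rw [pv_len_colouter, List.length_replicate]; exact hc)
      rw [pv_colfold_getD] at this
      simp only [pv_getD_replicate_false, Bool.false_or, List.length_replicate,
        hc', Bool.true_and, Bool.and_true] at this
      rw [List.any_eq_true] at this
      obtain ⟨row, hmem, hrow'⟩ := this
      obtain ⟨r, hrlen, rfl⟩ := List.mem_iff_getElem.mp hmem
      rw [List.length_take] at hrlen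
      rw [List.any_eq_true]
      refine ⟨r, List.mem_range.mpr (by omega), ?_⟩
      rw [pv_cellAt_eq]
      have hget : (blacks.take 8)[r] = blacks.getD r [] := by
        rw [List.getElem_take, List.getD_eq_getElem?_getD, List.getElem?_eq_getElem (by omega)]
        rfl
      rw [hget] at hrow'
      simp only [Bool.and_eq_true, decide_eq_true_eq] at hrow'
      exact hrow'.2
    · intro h j hj
      rw [pv_len_colouter, List.length_replicate] at hj
      have hj' : decide (j < (8:Nat)) = true := decide_eq_true hj
      rw [pv_colfold_getD]
      simp only [pv_getD_replicate_false, Bool.false_or, List.length_replicate,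
        hj', Bool.true_and, Bool.and_true]
      have hA := h j (List.mem_range.mpr hj)
      rw [List.any_eq_true] at hA
      obtain ⟨r, hr, hcell⟩ := hA
      rw [List.mem_range] at hr
      rw [pv_cellAt_eq] at hcell
      rw [List.any_eq_true]
      have hlt : r < blacks.length := by
        by_contra hge
        rw [List.getD_eq_getElem?_getD (l := blacks), List.getElem?_eq_none (by omega)] at hcell
        simp at hcell
      refine ⟨blacks.getD r [], ?_, ?_⟩
      · have : blacks.getD r [] = (blacks.take 8)[r]'(by simp [List.length_take]; omega) := by
          rw [List.getElem_take, List.getD_eq_getElem?_getD, List.getElem?_eq_getElem (by omega)]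
          rfl
        rw [this]
        exact List.getElem_mem _
      · have hjlen : j < (blacks.getD r []).length := by
          by_contra hge
          rw [List.getD_eq_getElem?_getD (l := blacks.getD r []), List.getElem?_eq_none (by omega)] at hcell
          simp at hcell
        simp only [Bool.and_eq_true, decide_eq_true_eq]
        exact ⟨hjlen, hcell⟩
  rw [hrow, hcol]
  by_cases h1 : (List.range 8).all (fun r => (pvRowAt blacks r).any id) = true
  · simp [h1]
  · simp only [Bool.not_eq_true] at h1
    simp [h1]
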